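-- pv_equiv track=rewrite | github.com/HugoAlmeidaMoreira/portal_base | src/scripts/002_data_trimmed.py | process_geografia
-- ===== SOURCE A (Python) =====
-- def process_geografia(entry):
--     if not isinstance(entry, str):
--         return 'Desconhecido', 'Desconhecido'
--     # Separar múltiplos locais pelo separador "|"
--     locais = entry.split(' | ')
--     # Extrair apenas NUTS I e NUTS II
--     nuts_ii = set()
--     for local in locais:
--         niveis = local.split(', ')
--         if len(niveis) >= 2:
--             nuts_ii.add(niveis[1])  # Pegamos no NUTS II
--         else:
--             nuts_ii.add('Portugal')  # Apenas Portugal (NUTS I)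
--
--     # Decidir o âmbito_geo
--     if len(nuts_ii) == 1:
--         if 'Portugal' in nuts_ii:
--             return 'Portugal', 'Nacional'
--         else:
--             return list(nuts_ii)[0], list(nuts_ii)[0]
--     else:
--         return 'Múltiplos', 'Múltiplos'
-- ===== SOURCE B (Python) =====
-- def process_geografia(entry):
--     if not isinstance(entry, str):
--         return 'Desconhecido', 'Desconhecido'
--     values = []
--     for local in entry.split(' | '):
--         niveis = local.split(', ')
--         values.append(niveis[1] if len(niveis) >= 2 else 'Portugal')
--     lo, hi = min(values), max(values)
--     if lo != hi:
--         return 'Múltiplos', 'Múltiplos'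
--     if lo == 'Portugal':
--         return 'Portugal', 'Nacional'
--     return lo, lo
-- ===== Notes on version B (the rewrite author's own statement) =====
-- stated objective: alternative
-- what changed: Replaces the accumulated set and its cardinality test by two staged passes: first materialize the list of per-local values, then decide uniformity by an order-based test comparing the lexicographic extremes (min(values) == max(values)) instead of counting distinct elements.
import Mathlib
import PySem

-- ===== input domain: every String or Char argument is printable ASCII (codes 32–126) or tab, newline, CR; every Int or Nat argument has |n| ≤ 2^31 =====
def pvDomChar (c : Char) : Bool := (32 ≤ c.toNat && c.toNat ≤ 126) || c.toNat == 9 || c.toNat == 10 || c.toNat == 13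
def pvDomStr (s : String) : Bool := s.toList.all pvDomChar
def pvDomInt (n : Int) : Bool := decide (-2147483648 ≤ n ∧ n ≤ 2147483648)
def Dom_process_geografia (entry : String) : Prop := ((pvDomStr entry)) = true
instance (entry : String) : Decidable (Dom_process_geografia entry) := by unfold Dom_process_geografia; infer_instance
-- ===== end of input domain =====

-- B decides uniformity by comparing the lexicographic extremes min(values) == max(values)
-- over the materialized list of per-local values, instead of A's accumulated set and its
-- cardinality test (alternative decomposition, same results).
-- The Lean `entry` is always a string, so A's non-str branch ('Desconhecido') is unreachable here.

-- ===== PORT A =====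
-- entry.split(' | ') / local.split(', '): sep ≠ "", so split? is always `some`; `.getD []` only unwraps it.
def process_geografia (entry : String) : String × String :=
  let locais := (PySem.Str.split? entry " | ").getD []
  let nuts_ii : PySem.Set String :=
    locais.foldl (fun s loc =>
      let niveis := (PySem.Str.split? loc ", ").getD []
      if niveis.length ≥ 2 then
        PySem.Set.add s (niveis.getD 1 "")   -- niveis[1]; in range under the guard
      else
        PySem.Set.add s "Portugal") PySem.Set.empty
  if PySem.Set.len nuts_ii = 1 then
    if PySem.Set.contains nuts_ii "Portugal" then ("Portugal", "Nacional")
    else (nuts_ii.getD 0 "", nuts_ii.getD 0 "")   -- list(nuts_ii)[0]: singleton set, order-independent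
  else ("Múltiplos", "Múltiplos")

-- ===== PORT B =====
def process_geografia_alt (entry : String) : String × String :=
  let values := ((PySem.Str.split? entry " | ").getD []).foldl (fun acc loc =>
    let niveis := (PySem.Str.split? loc ", ").getD []
    acc ++ [if niveis.length ≥ 2 then niveis.getD 1 "" else "Portugal"]) []
  match PySem.List.min? values (fun x => x), PySem.List.max? values (fun x => x) with
  | some lo, some hi =>
    if lo ≠ hi then ("Múltiplos", "Múltiplos")
    else if lo = "Portugal" then ("Portugal", "Nacional")
    else (lo, lo)
  | _, _ => ("Múltiplos", "Múltiplos")   -- unreachable: str.split always yields ≥ 1 piece, so min/max never raise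

-- ===== PRECONDITION & SPEC =====
def Spec_process_geografia (entry : String) (out : String × String) : Prop := out = process_geografia_alt entry
instance (entry : String) (out : String × String) : Decidable (Spec_process_geografia entry out) := by unfold Spec_process_geografia; infer_instance

-- ===== CLAIM =====
def Claim_equal_process_geografia : Prop := ∀ (entry : String), Dom_process_geografia entry → Spec_process_geografia entry (process_geografia entry)

-- ===== LEMMAS AND PROOFS =====

def pgValue (loc : String) : String :=
  let niveis := (PySem.Str.split? loc ", ").getD []
  if niveis.length ≥ 2 then niveis.getD 1 "" else "Portugal"

theorem ofList_all_eq {l : List String} {c : String} (h : ∀ v ∈ l, v = c) :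
    PySem.Set.ofList (c :: l) = [c] := by
  have : ∀ s : PySem.Set String, s = [c] → l.foldl PySem.Set.add s = [c] := by
    induction l with
    | nil => intro s hs; simpa using hs
    | cons x xs ih =>
      intro s hs
      have hx : x = c := h x (List.mem_cons_self)
      have : PySem.Set.add s x = [c] := by
        subst hs hx
        simp [PySem.Set.add, PySem.Set.contains]
      exact ih (fun v hv => h v (List.mem_cons_of_mem _ hv)) _ this
  have h0 : PySem.Set.add PySem.Set.empty c = [c] := rfl
  simpa [PySem.Set.ofList_eq_foldl, List.foldl_cons, h0] using this _ h0

theorem len_ne_one_of_two_mem {s : PySem.Set String} {a b : String}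
    (ha : a ∈ s) (hb : b ∈ s) (hab : a ≠ b) : s.length ≠ 1 := by
  intro h1
  rcases List.length_eq_one_iff.mp h1 with ⟨x, rfl⟩
  simp only [List.mem_singleton] at ha hb
  exact hab (ha.trans hb.symm)

theorem core (locais : List String) :
    (if PySem.Set.len (locais.foldl (fun s loc => PySem.Set.add s (pgValue loc)) PySem.Set.empty) = 1 then
      if PySem.Set.contains (locais.foldl (fun s loc => PySem.Set.add s (pgValue loc)) PySem.Set.empty) "Portugal"
      then ("Portugal", "Nacional")
      else ((locais.foldl (fun s loc => PySem.Set.add s (pgValue loc)) PySem.Set.empty).getD 0 "",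
            (locais.foldl (fun s loc => PySem.Set.add s (pgValue loc)) PySem.Set.empty).getD 0 "")
     else ("Múltiplos", "Múltiplos"))
    = (match PySem.List.min? (locais.map pgValue) (fun x => x),
             PySem.List.max? (locais.map pgValue) (fun x => x) with
       | some lo, some hi =>
         if lo ≠ hi then (("Múltiplos", "Múltiplos") : String × String)
         else if lo = "Portugal" then ("Portugal", "Nacional")
         else (lo, lo)
       | _, _ => ("Múltiplos", "Múltiplos")) := by
  have hset : locais.foldl (fun s loc => PySem.Set.add s (pgValue loc)) PySem.Set.empty
      = PySem.Set.ofList (locais.map pgValue) := by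
    rw [PySem.Set.ofList_eq_foldl, List.foldl_map]; rfl
  rw [hset]
  cases locais with
  | nil => simp [PySem.Set.len, PySem.List.min?, PySem.List.max?]
  | cons l0 rest =>
    rw [List.map_cons]
    rcases hmin : PySem.List.min? (pgValue l0 :: rest.map pgValue) (fun x => x) with _ | lo
    · exact absurd hmin (by simp [PySem.List.min?_eq_none_iff])
    rcases hmax : PySem.List.max? (pgValue l0 :: rest.map pgValue) (fun x => x) with _ | hi
    · exact absurd hmax (by simp [PySem.List.max?_eq_none_iff])
    have hlomem := PySem.List.min?_mem hmin
    have hhimem := PySem.List.max?_mem hmax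
    have hlole := PySem.List.min?_isMin hmin
    have hhige := PySem.List.max?_isMax hmax
    by_cases huni : ∀ v ∈ pgValue l0 :: rest.map pgValue, v = pgValue l0
    · -- uniform: the set is a singleton and lo = hi = pgValue l0
      have hone : PySem.Set.ofList (pgValue l0 :: rest.map pgValue) = [pgValue l0] :=
        ofList_all_eq (fun v hv => huni v (List.mem_cons_of_mem _ hv))
      have hlo : lo = pgValue l0 := huni _ hlomem
      have hhi : hi = pgValue l0 := huni _ hhimem
      rw [hone, hlo, hhi]
      by_cases hp : pgValue l0 = "Portugal"
      · simp [PySem.Set.len, PySem.Set.contains, hp]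
      · have hp' : ¬("Portugal" = pgValue l0) := fun h => hp h.symm
        simp [PySem.Set.len, PySem.Set.contains, hp, hp']
    · -- non-uniform: two distinct members, so len ≠ 1 and lo ≠ hi
      push_neg at huni
      obtain ⟨x, hxmem, hxne⟩ := huni
      have h1 : pgValue l0 ∈ PySem.Set.ofList (pgValue l0 :: rest.map pgValue) := by
        rw [PySem.Set.mem_ofList]; simp
      have h2 : x ∈ PySem.Set.ofList (pgValue l0 :: rest.map pgValue) := by
        rw [PySem.Set.mem_ofList]; exact hxmem
      have hlen := len_ne_one_of_two_mem h1 h2 (fun h => hxne h.symm)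
      have hlen' : ((PySem.Set.ofList (pgValue l0 :: rest.map pgValue)).length : Int) ≠ 1 := by
        exact_mod_cast hlen
      simp only [PySem.Set.len]
      rw [if_neg hlen']
      have hne : lo ≠ hi := by
        intro h
        apply hxne
        have ha := hlole _ hxmem
        have hb := hhige _ hxmem
        have ha0 := hlole _ (List.mem_cons_self)
        have hb0 := hhige _ (List.mem_cons_self)
        subst h
        exact (le_antisymm hb ha).trans (le_antisymm ha0 hb0)
      simp [hne]

theorem alt_values (entry : String) :
    (((PySem.Str.split? entry " | ").getD []).foldl (fun acc loc =>
      let niveis := (PySem.Str.split? loc ", ").getD []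
      acc ++ [if niveis.length ≥ 2 then niveis.getD 1 "" else "Portugal"]) [])
    = ((PySem.Str.split? entry " | ").getD []).map pgValue := by
  have hb2 : (fun (acc : List String) (loc : String) =>
      let niveis := (PySem.Str.split? loc ", ").getD []
      acc ++ [if niveis.length ≥ 2 then niveis.getD 1 "" else "Portugal"])
      = (fun (acc : List String) (loc : String) => acc ++ [pgValue loc]) := by
    funext acc loc; simp only [pgValue]
  rw [hb2, PySem.List.foldl_append_singleton_eq_map]
  rfl

-- ===== VERDICT =====
theorem process_geografia_spec : Claim_equal_process_geografia := by
  intro entry _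
  show process_geografia entry = process_geografia_alt entry
  unfold process_geografia process_geografia_alt
  simp only [alt_values]
  have hbody : (fun (s : PySem.Set String) (loc : String) =>
      let niveis := (PySem.Str.split? loc ", ").getD []
      if niveis.length ≥ 2 then PySem.Set.add s (niveis.getD 1 "")
      else PySem.Set.add s "Portugal")
      = (fun (s : PySem.Set String) (loc : String) => PySem.Set.add s (pgValue loc)) := by
    funext s loc; simp only [pgValue]; split <;> rfl
  rw [hbody]
  exact core ((PySem.Str.split? entry " | ").getD [])
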